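-- pv_equiv track=rewrite | github.com/cyh1123/checkio | O'Reilly/Create_Intervals.py | create_intervals
-- ===== SOURCE A (Python) =====
-- def create_intervals(data):
--     """
--         Create a list of intervals out of set of ints.
--     """
--     ans = []
--     if data:
--         start, end = min(data), max(data)
--         for i in range(start, end+1):
--             if i in data and i+1 not in data:
--                 ans.append((start, i))
--             if i not in data and i+1 in data:
--                 start = i+1
--     return ans
-- ===== SOURCE B (Python) =====
-- def create_intervals(data):
--     """
--         Create a list of intervals out of set of ints.
--     """
--     xs = sorted(set(data))
--     ans = []
--     if xs:
--         run_start = prev = xs[0]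
--         for x in xs[1:]:
--             if x != prev + 1:
--                 ans.append((run_start, prev))
--                 run_start = x
--             prev = x
--         ans.append((run_start, prev))
--     return ans
-- ===== Notes on version B (the rewrite author's own statement) =====
-- stated objective: faster
-- what changed: Instead of scanning every integer from min(data) to max(data) with repeated linear membership tests, B sorts the distinct elements once and closes an interval at each gap between consecutive sorted values.
import Mathlib
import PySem

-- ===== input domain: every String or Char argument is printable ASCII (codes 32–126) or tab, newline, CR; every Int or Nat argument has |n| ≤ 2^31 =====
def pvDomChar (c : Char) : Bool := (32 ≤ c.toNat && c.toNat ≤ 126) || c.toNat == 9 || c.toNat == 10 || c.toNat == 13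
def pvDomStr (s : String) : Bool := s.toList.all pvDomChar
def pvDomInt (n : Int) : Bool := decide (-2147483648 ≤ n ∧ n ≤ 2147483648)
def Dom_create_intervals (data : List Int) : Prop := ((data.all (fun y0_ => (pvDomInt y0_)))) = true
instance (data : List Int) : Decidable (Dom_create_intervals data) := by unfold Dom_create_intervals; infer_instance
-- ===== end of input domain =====

-- B replaces A's scan of every integer between min(data) and max(data) (with linear membership
-- tests) by grouping the sorted distinct elements into consecutive runs.

-- ===== PORT A =====
-- loop body of A's `for i in range(start, end+1)`: state = (start, ans)
def stepA (data : List Int) (st : Int × List (Int × Int)) (i : Int) : Int × List (Int × Int) :=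
  let ans := if i ∈ data ∧ (i + 1) ∉ data then st.2 ++ [(st.1, i)] else st.2
  let start := if i ∉ data ∧ (i + 1) ∈ data then i + 1 else st.1
  (start, ans)

def create_intervals (data : List Int) : List (Int × Int) :=
  if data = [] then []
  else
    match PySem.List.min? data (fun x => x), PySem.List.max? data (fun x => x) with
    | some start0, some end0 =>
        ((PySem.List.pyRange start0 (end0 + 1) 1).foldl (stepA data) (start0, [])).2
    | _, _ => []  -- unreachable: data is nonempty

-- ===== PORT B =====
-- B's `for x in xs[1:]` loop (state: run_start, prev, ans) followed by the final append
def groupRunsB (run_start prev : Int) (rest : List Int) (ans : List (Int × Int)) :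
    List (Int × Int) :=
  match rest with
  | [] => ans ++ [(run_start, prev)]
  | x :: xs =>
    if x ≠ prev + 1 then groupRunsB x x xs (ans ++ [(run_start, prev)])
    else groupRunsB run_start x xs ans

def create_intervals_alt (data : List Int) : List (Int × Int) :=
  match PySem.List.sorted (PySem.Set.ofList data) (fun x => x) false with
  | [] => []
  | x0 :: rest => groupRunsB x0 x0 rest []

-- ===== PRECONDITION & SPEC =====
def Spec_create_intervals (data : List Int) (out : List (Int × Int)) : Prop := out = create_intervals_alt data
instance (data : List Int) (out : List (Int × Int)) : Decidable (Spec_create_intervals data out) := by unfold Spec_create_intervals; infer_instance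

-- ===== CLAIM (what is proved, stated in full; the proofs are below) =====
def Claim_equal_create_intervals : Prop := ∀ (data : List Int), Dom_create_intervals data → Spec_create_intervals data (create_intervals data)

-- ===== LEMMAS AND PROOFS =====

-- head of a strictly increasing list is a lower bound
lemma pw_head_le (y : Int) (rest : List Int) (h : (y :: rest).Pairwise (· < ·)) :
    ∀ i ∈ y :: rest, y ≤ i := by
  intro i hi
  rcases List.mem_cons.mp hi with h1 | h2
  · omega
  · exact le_of_lt ((List.pairwise_cons.mp h).1 i h2)

-- last of a strictly increasing list is an upper bound
lemma pw_last_ge (l : List Int) (M : Int) (h : l.Pairwise (· < ·)) (hl : l.getLast? = some M) :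
    ∀ i ∈ l, i ≤ M := by
  induction l with
  | nil => simp at hl
  | cons y rest ih =>
    intro i hi
    cases rest with
    | nil =>
      simp at hl hi; omega
    | cons z zs =>
      rw [List.getLast?_cons_cons] at hl
      rcases List.mem_cons.mp hi with h1 | h2
      · subst h1
        have hM : M ∈ z :: zs := List.mem_of_getLast? hl
        have := (List.pairwise_cons.mp h).1 M hM
        omega
      · exact ih (List.pairwise_cons.mp h).2 hl i h2

-- main invariant of A's scan: scanning range [a, M] against the strictly increasing list
-- (y :: rest) of the elements of data that are ≥ a produces exactly B's grouped runs.
lemma scanA (data : List Int) : ∀ (n : Nat) (y M a s : Int) (rest : List Int)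
    (ans : List (Int × Int)),
    (M + 1 - a).toNat = n →
    (y :: rest).Pairwise (· < ·) →
    (y :: rest).getLast? = some M →
    (∀ i : Int, a ≤ i → (i ∈ data ↔ i ∈ y :: rest)) →
    a ≤ y →
    ((PySem.List.pyRange a (M + 1) 1).foldl (stepA data) (s, ans)).2
      = if a = y then groupRunsB s y rest ans else groupRunsB y y rest ans := by
  intro n
  induction n with
  | zero =>
    intro y M a s rest ans hn hpw hlast hmem hay
    have hy : y ≤ M := pw_last_ge _ M hpw hlast y (by simp)
    omega
  | succ n ih =>
    intro y M a s rest ans hn hpw hlast hmem hay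
    have hy : y ≤ M := pw_last_ge _ M hpw hlast y (by simp)
    have haM : a < M + 1 := by omega
    rw [PySem.List.pyRange_one_cons haM, List.foldl_cons]
    by_cases hcase : a = y
    · subst hcase
      have hadata : a ∈ data := (hmem a le_rfl).mpr (by simp)
      cases rest with
      | nil =>
        -- single remaining element: M = a
        have hMa : a = M := by simpa using hlast
        subst hMa
        have hnext : (a + 1) ∉ data := by
          intro hc
          have h2 : a + 1 = a := by simpa using (hmem (a + 1) (by omega)).mp hc
          omega
        have hstep : stepA data (s, ans) a = (s, ans ++ [(s, a)]) := by
          simp [stepA, hadata, hnext]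
        rw [hstep, PySem.List.pyRange_one_eq_nil (by omega), List.foldl_nil]
        simp [groupRunsB]
      | cons z zs =>
        have hlast' : (z :: zs).getLast? = some M := by
          rw [List.getLast?_cons_cons] at hlast; exact hlast
        have hzy : a < z := (List.pairwise_cons.mp hpw).1 z (by simp)
        have hzmin : ∀ i ∈ z :: zs, z ≤ i := pw_head_le z zs (List.pairwise_cons.mp hpw).2
        have hzM : z ≤ M := hzmin M (List.mem_of_getLast? hlast')
        have hmem' : ∀ i : Int, a + 1 ≤ i → (i ∈ data ↔ i ∈ z :: zs) := by
          intro i hi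
          rw [hmem i (by omega)]
          constructor
          · intro hc; rcases List.mem_cons.mp hc with h1 | h2
            · omega
            · exact h2
          · intro hc; exact List.mem_cons.mpr (Or.inr hc)
        by_cases hz1 : z = a + 1
        · -- run continues
          have hnext : (a + 1) ∈ data := (hmem (a + 1) (by omega)).mpr (by simp [← hz1])
          have hstep : stepA data (s, ans) a = (s, ans) := by
            simp [stepA, hadata, hnext]
          rw [hstep, ih z M (a + 1) s zs ans (by omega) (List.pairwise_cons.mp hpw).2 hlast' hmem' (by omega)]
          simp [groupRunsB, hz1]
        · -- gap after a: close the run (s, a)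
          have hz2 : a + 1 < z := by omega
          have hnext : (a + 1) ∉ data := by
            intro hc
            have := (hmem (a + 1) (by omega)).mp hc
            rcases List.mem_cons.mp this with h1 | h2
            · omega
            · have := hzmin _ h2; omega
          have hstep : stepA data (s, ans) a = (s, ans ++ [(s, a)]) := by
            simp [stepA, hadata, hnext]
          rw [hstep, ih z M (a + 1) s zs (ans ++ [(s, a)]) (by omega) (List.pairwise_cons.mp hpw).2 hlast' hmem' (by omega)]
          rw [if_neg (show ¬ a + 1 = z by omega), if_pos rfl]
          simp [groupRunsB, hz1]
    · -- a < y: a is below every element; nothing appended, start may advance to y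
      have hay' : a < y := lt_of_le_of_ne hay hcase
      have hmin : ∀ i ∈ y :: rest, y ≤ i := pw_head_le y rest hpw
      have hadata : a ∉ data := by
        intro hc
        have := hmin a ((hmem a le_rfl).mp hc); omega
      have hmem' : ∀ i : Int, a + 1 ≤ i → (i ∈ data ↔ i ∈ y :: rest) := fun i hi =>
        hmem i (by omega)
      by_cases hy1 : y = a + 1
      · have hnext : (a + 1) ∈ data := (hmem (a + 1) (by omega)).mpr (by simp [← hy1])
        have hstep : stepA data (s, ans) a = (a + 1, ans) := by
          simp [stepA, hadata, hnext]
        rw [hstep, ih y M (a + 1) (a + 1) rest ans (by omega) hpw hlast hmem' (by omega)]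
        rw [if_pos hy1.symm, if_neg hcase, hy1]
      · have hnext : (a + 1) ∉ data := by
          intro hc
          have := hmin _ ((hmem (a + 1) (by omega)).mp hc); omega
        have hstep : stepA data (s, ans) a = (s, ans) := by
          simp [stepA, hadata, hnext]
        rw [hstep, ih y M (a + 1) s rest ans (by omega) hpw hlast hmem' (by omega)]
        rw [if_neg (show ¬ a + 1 = y by omega), if_neg hcase]

-- ===== VERDICT (by name: the statement is the Claim_ definition above) =====
theorem create_intervals_spec : Claim_equal_create_intervals := by
  intro data _
  unfold Spec_create_intervals create_intervals create_intervals_alt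
  by_cases hdat : data = []
  · subst hdat; rfl
  · rw [if_neg hdat]
    have hpw := PySem.List.sorted_ofList_pairwise_lt data
    set ys := PySem.List.sorted (PySem.Set.ofList data) (fun x => x) false with hys
    have hmemys : ∀ i : Int, i ∈ ys ↔ i ∈ data := fun i =>
      (PySem.List.mem_sorted _ _ _ i).trans (PySem.Set.mem_ofList data i)
    have hysne : ys ≠ [] := by
      intro hc
      rcases List.exists_mem_of_ne_nil data hdat with ⟨x, hx⟩
      have hx2 : x ∈ ys := (hmemys x).mpr hx
      simp [hc] at hx2
    obtain ⟨y, rest, hcons⟩ := List.exists_cons_of_ne_nil hysne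
    obtain ⟨M, hM⟩ : ∃ M, ys.getLast? = some M := by
      cases h : ys.getLast? with
      | none => exact absurd (List.getLast?_eq_none_iff.mp h) hysne
      | some M => exact ⟨M, rfl⟩
    have hymem : y ∈ data := (hmemys y).mp (by rw [hcons]; simp)
    have hMmem : M ∈ data := (hmemys M).mp (List.mem_of_getLast? hM)
    have hylb : ∀ i ∈ data, y ≤ i := fun i hi =>
      pw_head_le y rest (hcons ▸ hpw) i (hcons ▸ (hmemys i).mpr hi)
    have hMub : ∀ i ∈ data, i ≤ M := fun i hi =>
      pw_last_ge ys M hpw hM i ((hmemys i).mpr hi)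
    have hminy : PySem.List.min? data (fun x => x) = some y := by
      cases hmin : PySem.List.min? data (fun x => x) with
      | none => exact absurd ((PySem.List.min?_eq_none_iff data _).mp hmin) hdat
      | some m =>
        have h1 : m ≤ y := PySem.List.min?_isMin hmin y hymem
        have h2 : y ≤ m := hylb m (PySem.List.min?_mem hmin)
        rw [show m = y by omega]
    have hmaxy : PySem.List.max? data (fun x => x) = some M := by
      cases hmax : PySem.List.max? data (fun x => x) with
      | none => exact absurd ((PySem.List.max?_eq_none_iff data _).mp hmax) hdat
      | some mx =>
        have h1 : mx ≤ M := hMub mx (PySem.List.max?_mem hmax)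
        have h2 : M ≤ mx := PySem.List.max?_isMax hmax M hMmem
        rw [show mx = M by omega]
    simp only [hminy, hmaxy, hcons]
    rw [scanA data ((M + 1 - y).toNat) y M y y rest [] rfl (hcons ▸ hpw) (hcons ▸ hM)
      (fun i _ => by rw [← hcons]; exact (hmemys i).symm) le_rfl]
    rw [if_pos rfl]
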